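-- pv_equiv track=rewrite | github.com/EclectX/HPC | tridiagonal/thomas/new_matrix_analysis/AFPM_D3.py | GroupX4
-- ===== SOURCE A (Python) =====
-- def GroupX4(c,d):
--     pp0 = [0,0,0,0,0,0,0,0]
--     pp1 = [0,0,0,0,0,0,0,0]
--     pp2 = [0,0,0,0,0,0,0,0]
--     pp3 = [0,0,0,0,0,0,0,0]
--
--     clm = [0,0,0,0,0,0,0,0,0,0,0]
--     cry = [0,0,0,0,0,0,0,0,0,0,0]
--     bit = [0,0,0,0,0,0,0,0,0,0,0]
--     result = 0
--
--     for i in range(8):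
--         pp0[i] = c[i] * d[0]
--         pp1[i] = c[i] * d[1]
--         pp2[i] = c[i] * d[2]
--         pp3[i] = c[i] * d[3]
--
--
--     clm[0]  = pp0[0]
--     clm[1]  = pp0[1] + pp1[0]
--     clm[2]  = pp0[2] + pp1[1] + pp2[0]
--     clm[3]  = pp0[3] + pp1[2] + pp2[1] + pp3[0]
--     clm[4]  = pp0[4] + pp1[3] + pp2[2] + pp3[1]
--     clm[5]  = pp0[5] + pp1[4] + pp2[3] + pp3[2]
--     clm[6]  = pp0[6] + pp1[5] + pp2[4] + pp3[3]
--     clm[7]  = pp0[7] + pp1[6] + pp2[5] + pp3[4]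
--     clm[8]  =          pp1[7] + pp2[6] + pp3[5]
--     clm[9]  =                   pp2[7] + pp3[6]
--     clm[10] =                            pp3[7]
--
--     for j in range(11):
--         cry[j] = clm[j] // 2
--         bit[j] = clm[j] %  2
--         if j<=3 :
--             result = result + bit[j]*(2**j)
--         else :
--             result = result + bit[j]*(2**j) + cry[j]*(2**(j+1))
--
--     return result
-- ===== SOURCE B (Python) =====
-- def GroupX4(c, d):
--     # Closed form: for columns j>=4 the carry/bit weights recombine to clm[j]*2**j,
--     # whose total is C*D minus the low columns' weighted sums; only the four low
--     # columns need their bits computed explicitly (their carries are discarded).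
--     full = sum(c[i] * (2 ** i) for i in range(8)) * sum(d[k] * (2 ** k) for k in range(4))
--     result = full
--     for j in range(4):
--         col = sum(c[i] * d[j - i] for i in range(j + 1))
--         result += ((col % 2) - col) * (2 ** j)
--     return result
-- ===== Notes on version B (the rewrite author's own statement) =====
-- stated objective: alternative
-- what changed: B replaces A's four partial-product arrays, eleven column equations and 11-step carry/bit loop by a closed form: it reconstructs the full product C*D from the weighted operands and only corrects the four low columns, whose carries A discards (for j>=4 A's bit*2^j + cry*2^(j+1) recombines exactly to clm[j]*2^j).
import Mathlib
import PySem

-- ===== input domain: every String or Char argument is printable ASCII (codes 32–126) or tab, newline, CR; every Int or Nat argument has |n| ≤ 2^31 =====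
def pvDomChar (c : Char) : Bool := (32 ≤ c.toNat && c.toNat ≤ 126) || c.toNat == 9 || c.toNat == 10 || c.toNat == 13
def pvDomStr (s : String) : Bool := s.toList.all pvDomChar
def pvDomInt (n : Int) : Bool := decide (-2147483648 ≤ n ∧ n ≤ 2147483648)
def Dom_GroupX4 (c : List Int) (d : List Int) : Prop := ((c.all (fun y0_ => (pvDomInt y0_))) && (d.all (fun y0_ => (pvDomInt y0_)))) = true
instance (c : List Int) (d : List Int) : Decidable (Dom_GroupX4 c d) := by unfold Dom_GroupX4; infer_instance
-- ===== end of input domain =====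

-- B replaces A's partial-product tables and carry/bit loop by a closed form: for columns
-- j >= 4 A's bit*2^j + cry*2^(j+1) recombines to clm[j]*2^j, whose total is C*D minus the
-- low columns' weighted sums; only the four low columns' bits are computed (objective: alternative).

-- xs[i] for an index known to be in range (both Pythons index this way)
def pvAt (xs : List Int) (i : Int) : Int := (PySem.List.pyGet? xs i).getD 0

-- ===== PORT A =====
-- the second loop of A: carry/bit recombination over the 11 columns
def pvCarry (clm : List Int) : Int :=
  (PySem.List.pyRange 0 11 1).foldl
    (fun result j =>
      let cry := PySem.Int.floordiv (pvAt clm j) 2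
      let bit := PySem.Int.mod (pvAt clm j) 2
      if j ≤ 3 then result + bit * 2 ^ j.toNat
      else result + bit * 2 ^ j.toNat + cry * 2 ^ (j + 1).toNat)
    0

-- the pp-filling loop, then the eleven explicit column sums
def pvAClm (c : List Int) (d : List Int) : List Int :=
  let pp := (PySem.List.pyRange 0 8 1).foldl
    (fun (s : List Int × List Int × List Int × List Int) i =>
      (s.1.set i.toNat (pvAt c i * pvAt d 0),
       s.2.1.set i.toNat (pvAt c i * pvAt d 1),
       s.2.2.1.set i.toNat (pvAt c i * pvAt d 2),
       s.2.2.2.set i.toNat (pvAt c i * pvAt d 3)))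
    (List.replicate 8 0, List.replicate 8 0, List.replicate 8 0, List.replicate 8 0)
  let pp0 := pp.1
  let pp1 := pp.2.1
  let pp2 := pp.2.2.1
  let pp3 := pp.2.2.2
  [pvAt pp0 0,
   pvAt pp0 1 + pvAt pp1 0,
   pvAt pp0 2 + pvAt pp1 1 + pvAt pp2 0,
   pvAt pp0 3 + pvAt pp1 2 + pvAt pp2 1 + pvAt pp3 0,
   pvAt pp0 4 + pvAt pp1 3 + pvAt pp2 2 + pvAt pp3 1,
   pvAt pp0 5 + pvAt pp1 4 + pvAt pp2 3 + pvAt pp3 2,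
   pvAt pp0 6 + pvAt pp1 5 + pvAt pp2 4 + pvAt pp3 3,
   pvAt pp0 7 + pvAt pp1 6 + pvAt pp2 5 + pvAt pp3 4,
   pvAt pp1 7 + pvAt pp2 6 + pvAt pp3 5,
   pvAt pp2 7 + pvAt pp3 6,
   pvAt pp3 7]

def GroupX4 (c : List Int) (d : List Int) : Int := pvCarry (pvAClm c d)

-- ===== PORT B =====
def GroupX4_alt (c : List Int) (d : List Int) : Int :=
  let full := ((PySem.List.pyRange 0 8 1).foldl (fun s i => s + pvAt c i * 2 ^ i.toNat) 0) *
              ((PySem.List.pyRange 0 4 1).foldl (fun s k => s + pvAt d k * 2 ^ k.toNat) 0)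
  (PySem.List.pyRange 0 4 1).foldl
    (fun result j =>
      let col := (PySem.List.pyRange 0 (j + 1) 1).foldl
        (fun s i => s + pvAt c i * pvAt d (j - i)) 0
      result + (PySem.Int.mod col 2 - col) * 2 ^ j.toNat)
    full

-- ===== PRECONDITION & SPEC =====
-- A raises IndexError when len(c) < 8 or len(d) < 4 (it reads c[0..7] and d[0..3]); B does too.
def Pre_GroupX4 (c : List Int) (d : List Int) : Prop := 8 ≤ c.length ∧ 4 ≤ d.length
instance (c : List Int) (d : List Int) : Decidable (Pre_GroupX4 c d) := by unfold Pre_GroupX4; infer_instance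
def pvWitness_GroupX4 : List Int × List Int := ([1, 0, 1, 1, 0, 0, 1, 0], [1, 1, 0, 1])

def Spec_GroupX4 (c : List Int) (d : List Int) (out : Int) : Prop := out = GroupX4_alt c d
instance (c : List Int) (d : List Int) (out : Int) : Decidable (Spec_GroupX4 c d out) := by unfold Spec_GroupX4; infer_instance

-- ===== CLAIM (what is proved, stated in full; the proofs are below) =====
def Claim_equal_GroupX4 : Prop := ∀ (c : List Int) (d : List Int), Dom_GroupX4 c d → Pre_GroupX4 c d → Spec_GroupX4 c d (GroupX4 c d)

-- ===== LEMMAS AND PROOFS =====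

lemma pvCondTrue' (n : Nat) (a b : Int) (h : a < b) : (a < (n : Int) + b) ↔ True :=
  iff_true_intro (lt_add_of_nonneg_of_lt (Int.natCast_nonneg n) h)

-- closed form of A's carry/bit loop on an explicit 11-element column list
lemma pvCarry_closed (x0 x1 x2 x3 x4 x5 x6 x7 x8 x9 x10 : Int) :
    pvCarry [x0, x1, x2, x3, x4, x5, x6, x7, x8, x9, x10] =
    (x0 + 2*x1 + 4*x2 + 8*x3 + 16*x4 + 32*x5 + 64*x6 + 128*x7 + 256*x8 + 512*x9 + 1024*x10)
    + (PySem.Int.mod x0 2 - x0) * 1 + (PySem.Int.mod x1 2 - x1) * 2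
    + (PySem.Int.mod x2 2 - x2) * 4 + (PySem.Int.mod x3 2 - x3) * 8 := by
  simp [pvCarry, pvAt, show PySem.List.pyRange 0 11 1 = [0,1,2,3,4,5,6,7,8,9,10] by decide,
    PySem.List.pyGet?, PySem.List.pyIdx?]
  linear_combination 16 * Int.ediv_add_emod x4 2 + 32 * Int.ediv_add_emod x5 2
    + 64 * Int.ediv_add_emod x6 2 + 128 * Int.ediv_add_emod x7 2 + 256 * Int.ediv_add_emod x8 2
    + 512 * Int.ediv_add_emod x9 2 + 1024 * Int.ediv_add_emod x10 2

set_option maxHeartbeats 4000000 in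
theorem GroupX4_spec : Claim_equal_GroupX4 := by
  intro c d _ hpre
  obtain ⟨hc, hd⟩ := hpre
  rcases c with _ | ⟨c0, c⟩; · simp at hc
  rcases c with _ | ⟨c1, c⟩; · simp at hc
  rcases c with _ | ⟨c2, c⟩; · simp at hc
  rcases c with _ | ⟨c3, c⟩; · simp at hc
  rcases c with _ | ⟨c4, c⟩; · simp at hc
  rcases c with _ | ⟨c5, c⟩; · simp at hc
  rcases c with _ | ⟨c6, c⟩; · simp at hc
  rcases c with _ | ⟨c7, c⟩; · simp at hc
  rcases d with _ | ⟨d0, d⟩; · simp at hd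
  rcases d with _ | ⟨d1, d⟩; · simp at hd
  rcases d with _ | ⟨d2, d⟩; · simp at hd
  rcases d with _ | ⟨d3, d⟩; · simp at hd
  show GroupX4 _ _ = GroupX4_alt _ _
  have ec0 : pvAt (c0 :: c1 :: c2 :: c3 :: c4 :: c5 :: c6 :: c7 :: c) 0 = c0 := by
    simp [pvAt, PySem.List.pyGet?, PySem.List.pyIdx?]; try rw [if_pos (by omega)]; try simp
  have ec1 : pvAt (c0 :: c1 :: c2 :: c3 :: c4 :: c5 :: c6 :: c7 :: c) 1 = c1 := by
    simp [pvAt, PySem.List.pyGet?, PySem.List.pyIdx?]; try rw [if_pos (by omega)]; try simp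
  have ec2 : pvAt (c0 :: c1 :: c2 :: c3 :: c4 :: c5 :: c6 :: c7 :: c) 2 = c2 := by
    simp [pvAt, PySem.List.pyGet?, PySem.List.pyIdx?]; try rw [if_pos (by omega)]; try simp
  have ec3 : pvAt (c0 :: c1 :: c2 :: c3 :: c4 :: c5 :: c6 :: c7 :: c) 3 = c3 := by
    simp [pvAt, PySem.List.pyGet?, PySem.List.pyIdx?]; try rw [if_pos (by omega)]; try simp
  have ec4 : pvAt (c0 :: c1 :: c2 :: c3 :: c4 :: c5 :: c6 :: c7 :: c) 4 = c4 := by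
    simp [pvAt, PySem.List.pyGet?, PySem.List.pyIdx?]; try rw [if_pos (by omega)]; try simp
  have ec5 : pvAt (c0 :: c1 :: c2 :: c3 :: c4 :: c5 :: c6 :: c7 :: c) 5 = c5 := by
    simp [pvAt, PySem.List.pyGet?, PySem.List.pyIdx?]; try rw [if_pos (by omega)]; try simp
  have ec6 : pvAt (c0 :: c1 :: c2 :: c3 :: c4 :: c5 :: c6 :: c7 :: c) 6 = c6 := by
    simp [pvAt, PySem.List.pyGet?, PySem.List.pyIdx?]; try rw [if_pos (by omega)]; try simp
  have ec7 : pvAt (c0 :: c1 :: c2 :: c3 :: c4 :: c5 :: c6 :: c7 :: c) 7 = c7 := by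
    simp [pvAt, PySem.List.pyGet?, PySem.List.pyIdx?]; try rw [if_pos (by omega)]; try simp
  have ed0 : pvAt (d0 :: d1 :: d2 :: d3 :: d) 0 = d0 := by
    simp [pvAt, PySem.List.pyGet?, PySem.List.pyIdx?]; try rw [if_pos (by omega)]; try simp
  have ed1 : pvAt (d0 :: d1 :: d2 :: d3 :: d) 1 = d1 := by
    simp [pvAt, PySem.List.pyGet?, PySem.List.pyIdx?]; try rw [if_pos (by omega)]; try simp
  have ed2 : pvAt (d0 :: d1 :: d2 :: d3 :: d) 2 = d2 := by
    simp [pvAt, PySem.List.pyGet?, PySem.List.pyIdx?]; try rw [if_pos (by omega)]; try simp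
  have ed3 : pvAt (d0 :: d1 :: d2 :: d3 :: d) 3 = d3 := by
    simp [pvAt, PySem.List.pyGet?, PySem.List.pyIdx?]; try rw [if_pos (by omega)]; try simp
  have hA : pvAClm (c0 :: c1 :: c2 :: c3 :: c4 :: c5 :: c6 :: c7 :: c)
      (d0 :: d1 :: d2 :: d3 :: d) =
      [c0*d0, c1*d0 + c0*d1, c2*d0 + c1*d1 + c0*d2, c3*d0 + c2*d1 + c1*d2 + c0*d3,
       c4*d0 + c3*d1 + c2*d2 + c1*d3, c5*d0 + c4*d1 + c3*d2 + c2*d3,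
       c6*d0 + c5*d1 + c4*d2 + c3*d3, c7*d0 + c6*d1 + c5*d2 + c4*d3,
       c7*d1 + c6*d2 + c5*d3, c7*d2 + c6*d3, c7*d3] := by
    simp [pvAClm, show PySem.List.pyRange 0 8 1 = [0,1,2,3,4,5,6,7] by decide,
      ec0, ec1, ec2, ec3, ec4, ec5, ec6, ec7, ed0, ed1, ed2, ed3,
      pvAt, PySem.List.pyGet?, PySem.List.pyIdx?, List.set, add_assoc, pvCondTrue']
  rw [GroupX4, hA, pvCarry_closed]
  simp only [GroupX4_alt, show PySem.List.pyRange 0 8 1 = [0,1,2,3,4,5,6,7] by decide,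
    show PySem.List.pyRange 0 4 1 = [0,1,2,3] by decide,
    show PySem.List.pyRange 0 (0+1) 1 = [0] by decide,
    show PySem.List.pyRange 0 (1+1) 1 = [0,1] by decide,
    show PySem.List.pyRange 0 (2+1) 1 = [0,1,2] by decide,
    show PySem.List.pyRange 0 (3+1) 1 = [0,1,2,3] by decide,
    List.foldl_cons, List.foldl_nil]
  norm_num [ec0, ec1, ec2, ec3, ec4, ec5, ec6, ec7, ed0, ed1, ed2, ed3, show Int.toNat 2 = 2 from rfl, show Int.toNat 3 = 3 from rfl, show Int.toNat 4 = 4 from rfl, show Int.toNat 5 = 5 from rfl, show Int.toNat 6 = 6 from rfl, show Int.toNat 7 = 7 from rfl, show Int.toNat 8 = 8 from rfl, show Int.toNat 9 = 9 from rfl, show Int.toNat 10 = 10 from rfl, show Int.toNat 11 = 11 from rfl]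
  ring
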